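-- pv_equiv track=rewrite | github.com/3pacs/GRID | discovery/orthogonality.py | _group_by_family
-- ===== SOURCE A (Python) =====
-- def _group_by_family(feature_ids: list[int], families: dict[int, str]) -> dict[str, list[int]]:
--     """Group feature IDs by their family."""
--     result: dict[str, list[int]] = {}
--     for fid in feature_ids:
--         fam = families.get(fid, "other")
--         if fam not in result:
--             result[fam] = []
--         result[fam].append(fid)
--     return result
-- ===== SOURCE B (Python) =====
-- def _group_by_family(feature_ids: list[int], families: dict[int, str]) -> dict[str, list[int]]:
--     """Group feature IDs by their family (family-at-a-time: dedup the family labels, then filter per family)."""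
--     fams = [families.get(fid, "other") for fid in feature_ids]
--     keys = list(dict.fromkeys(fams))
--     return {fam: [fid for fid, f in zip(feature_ids, fams) if f == fam] for fam in keys}
-- ===== Notes on version B (the rewrite author's own statement) =====
-- stated objective: alternative
-- what changed: Replaces the single incremental dict-building scan with a two-phase family-at-a-time computation: map every id to its family label, dedup the labels in first-occurrence order, then build each group by one filter pass over the zipped (id, label) list.
import Mathlib
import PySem

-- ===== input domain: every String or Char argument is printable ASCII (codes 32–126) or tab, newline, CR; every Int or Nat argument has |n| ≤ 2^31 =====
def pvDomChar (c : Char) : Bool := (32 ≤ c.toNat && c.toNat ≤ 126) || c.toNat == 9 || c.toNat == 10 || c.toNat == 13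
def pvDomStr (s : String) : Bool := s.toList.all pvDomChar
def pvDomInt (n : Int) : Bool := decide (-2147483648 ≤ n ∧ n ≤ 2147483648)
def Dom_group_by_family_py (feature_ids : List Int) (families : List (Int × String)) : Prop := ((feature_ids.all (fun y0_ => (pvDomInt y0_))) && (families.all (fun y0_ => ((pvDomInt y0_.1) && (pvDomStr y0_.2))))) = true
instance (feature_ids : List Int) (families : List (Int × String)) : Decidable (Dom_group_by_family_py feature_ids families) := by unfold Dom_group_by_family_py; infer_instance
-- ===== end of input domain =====

-- B re-derives the grouping family-at-a-time (dedup the labels, then one filter per family) instead of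
-- A's single incremental dict-building scan — an alternative decomposition, not faster (O(n*k) vs A's O(n)).
-- ===== PORT A =====
-- A: one incremental scan; result dict built with "if fam not in result: result[fam]=[]" then append.
def group_by_family_py (feature_ids : List Int) (families : List (Int × String)) : List (String × List Int) :=
  (feature_ids.foldl
    (fun result fid =>
      let fam := (PySem.Dict.ofList families).getD fid "other"
      let result := if result.contains fam then result else result.insert fam ([] : List Int)
      result.modify fam [] (fun xs => xs ++ [fid]))
    PySem.Dict.empty).items

-- ===== PORT B =====
-- B: map ids to family labels, dedup labels in first-occurrence order, one filter pass per family.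
def group_by_family_py_alt (feature_ids : List Int) (families : List (Int × String)) : List (String × List Int) :=
  let fams := feature_ids.map (fun fid => (PySem.Dict.ofList families).getD fid "other")
  let keys := PySem.List.dedup fams
  keys.map (fun fam =>
    (fam, ((feature_ids.zip fams).filter (fun p => p.2 == fam)).map (fun p => p.1)))

-- ===== PRECONDITION & SPEC =====
def Spec_group_by_family_py (feature_ids : List Int) (families : List (Int × String)) (out : List (String × List Int)) : Prop := out = group_by_family_py_alt feature_ids families
instance (feature_ids : List Int) (families : List (Int × String)) (out : List (String × List Int)) : Decidable (Spec_group_by_family_py feature_ids families out) := by unfold Spec_group_by_family_py; infer_instance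

-- ===== CLAIM (what is proved, stated in full; the proofs are below) =====
def Claim_equal_group_by_family_py : Prop := ∀ (feature_ids : List Int) (families : List (Int × String)), Dom_group_by_family_py feature_ids families → Spec_group_by_family_py feature_ids families (group_by_family_py feature_ids families)

-- ===== LEMMAS AND PROOFS =====


-- A's loop body equals a bare dict.modify (the conditional insert of [] is absorbed by modify's default).
theorem stepA_eq_modify (d : PySem.Dict String (List Int)) (fam : String) (fid : Int) :
    ((if d.contains fam then d else d.insert fam ([] : List Int)).modify fam [] (fun xs => xs ++ [fid]))
      = d.modify fam [] (fun xs => xs ++ [fid]) := by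
  by_cases h : d.contains fam = true
  · simp [h]
  · simp only [Bool.not_eq_true] at h
    simp [h, PySem.Dict.modify, PySem.Dict.getD_insert_self, PySem.Dict.insert_insert_self,
      PySem.Dict.getD_of_not_contains d ([] : List Int) h]

theorem zip_map_self {α β : Type} (xs : List α) (f : α → β) :
    xs.zip (xs.map f) = xs.map (fun x => (x, f x)) := by
  simpa using (List.zip_map' (f := @id α) (g := f) (l := xs))

theorem filter_snd_map_fst {α β : Type} [BEq β] (xs : List α) (f : α → β) (k : β) :
    ((xs.map (fun x => (x, f x))).filter (fun p => p.2 == k)).map (fun p => p.1)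
      = ((xs.map (fun x => (f x, x))).filter (fun p => p.1 == k)).map (fun p => p.2) := by
  induction xs with
  | nil => rfl
  | cons x xs ih =>
    by_cases h : f x == k <;> simp [h, ih]

-- ===== VERDICT (by name: the statement is the Claim_ definition above) =====
theorem group_by_family_py_spec : Claim_equal_group_by_family_py := by
  intro feature_ids families _
  unfold Spec_group_by_family_py group_by_family_py group_by_family_py_alt
  set F : Int → String := fun fid => (PySem.Dict.ofList families).getD fid "other" with hF
  have hstep : (feature_ids.foldl
      (fun result fid =>
        let fam := F fid
        let result := if result.contains fam then result else result.insert fam ([] : List Int)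
        result.modify fam [] (fun xs => xs ++ [fid]))
      PySem.Dict.empty)
    = (feature_ids.map (fun fid => (F fid, fid))).foldl
        (fun d p => d.modify p.1 [] (fun xs => xs ++ [p.2])) PySem.Dict.empty := by
    rw [List.foldl_map]
    refine (PySem.List.foldl_congr_mem feature_ids _ _ _ ?_).symm
    intro acc x _
    exact (stepA_eq_modify acc (F x) x).symm
  rw [hstep]
  set l : List (String × Int) := feature_ids.map (fun fid => (F fid, fid)) with hl
  set d := l.foldl (fun d p => d.modify p.1 [] (fun xs => xs ++ [p.2])) PySem.Dict.empty with hd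
  have hnodup : d.keys.Nodup := by
    rw [hd]
    exact PySem.Dict.nodup_keys_foldl_modify_key l Prod.fst []
      (fun _ p xs => xs ++ [p.2]) PySem.Dict.empty (by simp)
  have hkeys : d.keys = PySem.List.dedup (feature_ids.map F) := by
    rw [hd]
    have := PySem.Dict.keys_foldl_modify_key (l := l) (key := Prod.fst)
      (d0 := ([] : List Int)) (f := fun _ p xs => xs ++ [p.2]) (d := PySem.Dict.empty)
    rw [this]
    simp [hl, PySem.Set.update_nil_left, List.map_map, Function.comp_def]
  have hget : ∀ k, d.getD k [] = ((l.filter (fun p => p.1 == k)).map (fun p => p.2)) := by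
    intro k
    rw [hd, PySem.Dict.getD_foldl_modify_append]
    simp
  rw [PySem.Dict.items_eq_map_keys d hnodup [], hkeys]
  apply List.map_congr_left
  intro fam _
  refine Prod.ext rfl ?_
  rw [hget fam, zip_map_self, filter_snd_map_fst, hl]
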